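-- pv_equiv track=rewrite | github.com/SpaghettiArchitect/python-mooc-2025 | part05-03_go/src/go.py | who_won
-- ===== SOURCE A (Python) =====
-- def who_won(game_board: list[list[int]]):
--     total_player_one = 0
--     total_player_two = 0
--     for row in game_board:
--         for column in row:
--             if column == 1:
--                 total_player_one += 1
--             elif column == 2:
--                 total_player_two += 1
--             else:
--                 continue
--
--     if total_player_one > total_player_two:
--         return 1
--     elif total_player_two > total_player_one:
--         return 2
--     else:
--         return 0
-- ===== SOURCE B (Python) =====
-- def who_won(game_board: list[list[int]]):
--     # Single signed balance (+1 for each 1, -1 for each 2) computed by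
--     # structural recursion on the row list; winner is the sign of the balance.
--     def balance(rows):
--         if not rows:
--             return 0
--         head, *rest = rows
--         return sum((x == 1) - (x == 2) for x in head) + balance(rest)
--     b = balance(game_board)
--     return 1 if b > 0 else 2 if b < 0 else 0
-- ===== Notes on version B (the rewrite author's own statement) =====
-- stated objective: alternative
-- what changed: Instead of maintaining two separate tallies in one imperative double loop and comparing them, B recursively computes a single signed balance (+1 per 1, -1 per 2) over the rows and returns the winner as the sign of that balance.
import Mathlib
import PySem

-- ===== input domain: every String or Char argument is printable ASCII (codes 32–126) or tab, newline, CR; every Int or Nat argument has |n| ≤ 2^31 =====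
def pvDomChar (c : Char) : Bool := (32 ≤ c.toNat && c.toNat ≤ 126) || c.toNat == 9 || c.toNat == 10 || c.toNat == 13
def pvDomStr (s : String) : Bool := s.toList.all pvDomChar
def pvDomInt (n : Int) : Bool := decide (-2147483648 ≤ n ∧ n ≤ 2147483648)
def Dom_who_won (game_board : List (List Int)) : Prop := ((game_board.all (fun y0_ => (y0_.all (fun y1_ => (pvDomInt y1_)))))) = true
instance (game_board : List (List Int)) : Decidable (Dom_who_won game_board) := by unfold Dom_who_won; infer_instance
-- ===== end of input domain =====

-- B: replaces A's two-counter imperative double loop by a recursive single signed balance (+1 per 1, -1 per 2) whose sign is the winner; same cost, different state.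


-- ===== PORT A =====
def who_won (game_board : List (List Int)) : Int :=
  let r := game_board.foldl (fun (acc : Int × Int) row =>
    row.foldl (fun (acc : Int × Int) column =>
      if column == 1 then (acc.1 + 1, acc.2)
      else if column == 2 then (acc.1, acc.2 + 1)
      else acc) acc) (0, 0)
  if r.1 > r.2 then 1 else if r.2 > r.1 then 2 else 0

-- ===== PORT B =====
-- `(x == 1) - (x == 2)` in Python is int arithmetic on bools; ported as the
-- corresponding 0/1-valued ifs.
def who_won_balance (rows : List (List Int)) : Int :=
  match rows with
  | [] => 0
  | head :: rest =>
    (head.map (fun x => (if x == 1 then (1 : Int) else 0) - (if x == 2 then (1 : Int) else 0))).sum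
      + who_won_balance rest

def who_won_alt (game_board : List (List Int)) : Int :=
  let b := who_won_balance game_board
  if b > 0 then 1 else if b < 0 then 2 else 0

-- ===== PRECONDITION & SPEC =====
def Spec_who_won (game_board : List (List Int)) (out : Int) : Prop := out = who_won_alt game_board
instance (game_board : List (List Int)) (out : Int) : Decidable (Spec_who_won game_board out) := by unfold Spec_who_won; infer_instance

-- ===== CLAIM (what is proved, stated in full; the proofs are below) =====
def Claim_equal_who_won : Prop := ∀ (game_board : List (List Int)), Dom_who_won game_board → Spec_who_won game_board (who_won game_board)

-- ===== LEMMAS AND PROOFS =====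

lemma who_won_inner (row : List Int) (acc : Int × Int) :
    row.foldl (fun (acc : Int × Int) column =>
      if column == 1 then (acc.1 + 1, acc.2)
      else if column == 2 then (acc.1, acc.2 + 1)
      else acc) acc
    = (acc.1 + (row.count 1 : Int), acc.2 + (row.count 2 : Int)) := by
  induction row generalizing acc with
  | nil => simp
  | cons x xs ih =>
    simp only [List.foldl_cons, List.count_cons, ih]
    rcases eq_or_ne x 1 with h1 | h1
    · subst h1; simp only [Prod.ext_iff]; simp; omega
    · rcases eq_or_ne x 2 with h2 | h2
      · subst h2; simp only [Prod.ext_iff]; simp; omega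
      · simp [h1, h2]

lemma who_won_row_balance (row : List Int) :
    (row.map (fun x => (if x == 1 then (1 : Int) else 0) - (if x == 2 then (1 : Int) else 0))).sum
      = (row.count 1 : Int) - (row.count 2 : Int) := by
  induction row with
  | nil => simp
  | cons x xs ih =>
    simp only [List.map_cons, List.sum_cons, List.count_cons, ih]
    rcases eq_or_ne x 1 with h1 | h1
    · subst h1; simp; omega
    · rcases eq_or_ne x 2 with h2 | h2
      · subst h2; simp; omega
      · simp [h1, h2]

lemma who_won_outer (board : List (List Int)) (acc : Int × Int) :
    board.foldl (fun (acc : Int × Int) row =>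
      row.foldl (fun (acc : Int × Int) column =>
        if column == 1 then (acc.1 + 1, acc.2)
        else if column == 2 then (acc.1, acc.2 + 1)
        else acc) acc) acc
    = (acc.1 + ((board.map (fun row => (row.count 1 : Int))).sum),
       acc.2 + ((board.map (fun row => (row.count 2 : Int))).sum)) := by
  induction board generalizing acc with
  | nil => simp
  | cons r rs ih =>
    rw [List.foldl_cons, who_won_inner, ih]
    simp only [List.map_cons, List.sum_cons, Prod.ext_iff]
    constructor <;> ring

lemma who_won_balance_eq (board : List (List Int)) :
    who_won_balance board
    = ((board.map (fun row => (row.count 1 : Int))).sum)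
      - ((board.map (fun row => (row.count 2 : Int))).sum) := by
  induction board with
  | nil => simp [who_won_balance]
  | cons r rs ih =>
    simp only [who_won_balance, who_won_row_balance, ih, List.map_cons, List.sum_cons]
    ring

-- ===== VERDICT (by name: the statement is the Claim_ definition above) =====
theorem who_won_spec : Claim_equal_who_won := by
  intro gb _
  unfold Spec_who_won who_won who_won_alt
  simp only [who_won_outer, who_won_balance_eq]
  set c1 := ((gb.map (fun row => (row.count 1 : Int))).sum)
  set c2 := ((gb.map (fun row => (row.count 2 : Int))).sum)

  split_ifs <;> omega
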